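-- pv_equiv track=rewrite | github.com/BITprogramMan/coding_practice | 左神中级班/选择工作.py | choose_work
-- ===== SOURCE A (Python) =====
-- def choose_work(jobs, ability):
--     jobs.sort(key=lambda x:(x[0], -x[1])) # x[0]表示难度，x[1]表示报酬
--     mapping = []
--     mapping.append(jobs[0])
--     pre = jobs[0]
--     for i in range(1, len(jobs)):
--         if jobs[i][0] != pre[0] and jobs[i][1] > pre[1]:
--             pre = jobs[i]
--             mapping.append(pre)
--     ans = []
--     def binary_search(job_list, ability):
--         l, r = 0, len(job_list) - 1
--         res = -1
--         while l <= r: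
--             mid = l + (r - l) // 2
--             if job_list[mid][0] == ability:
--                 return job_list[mid][1]
--             elif job_list[mid][0] < ability:
--                 res = job_list[mid][1]
--                 l = mid + 1
--             else:
--                 r = mid - 1
--         return res
--     for val in ability:
--         ans.append(binary_search(mapping, val))
--     return ans
-- ===== SOURCE B (Python) =====
-- def choose_work(jobs, ability):
--     # Same return value as A; also sorts `jobs` in place like A.
--     jobs.sort(key=lambda x: (x[0], -x[1]))
--     # running-max filter: keep a job iff its reward beats every reward kept so far
--     mapping = []
--     best = None
--     for job in jobs:
--         if best is None or job[1] > best: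
--             best = job[1]
--             mapping.append((job[0], job[1]))
--     # single two-pointer sweep over abilities processed in ascending order
--     n = len(ability)
--     order = sorted(range(n), key=lambda i: ability[i])
--     ans = [-1] * n
--     j = 0
--     res = -1
--     for i in order:
--         a = ability[i]
--         while j < len(mapping) and mapping[j][0] <= a:
--             res = mapping[j][1]
--             j += 1
--         ans[i] = res
--     return ans
-- ===== Notes on version B (the rewrite author's own statement) =====
-- stated objective: alternative
-- what changed: A answers each ability with its own binary search over the monotonic (difficulty, reward) mapping, which it builds by comparing each sorted job against the last kept one; B builds the mapping with a running-max reward filter and answers all abilities in one left-to-right two-pointer sweep after sorting the ability indices, scattering results back into original order.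
import Mathlib
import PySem

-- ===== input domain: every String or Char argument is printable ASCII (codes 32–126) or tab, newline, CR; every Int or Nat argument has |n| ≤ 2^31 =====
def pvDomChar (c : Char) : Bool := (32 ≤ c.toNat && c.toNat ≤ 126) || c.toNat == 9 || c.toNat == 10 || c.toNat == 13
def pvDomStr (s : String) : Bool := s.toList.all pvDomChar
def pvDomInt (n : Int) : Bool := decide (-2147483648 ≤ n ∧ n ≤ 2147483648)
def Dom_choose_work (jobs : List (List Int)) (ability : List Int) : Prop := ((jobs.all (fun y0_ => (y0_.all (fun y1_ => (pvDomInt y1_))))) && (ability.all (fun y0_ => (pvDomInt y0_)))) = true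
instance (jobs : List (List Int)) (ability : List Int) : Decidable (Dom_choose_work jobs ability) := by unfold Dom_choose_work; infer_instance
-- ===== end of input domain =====

-- B replaces A's per-ability binary search by one two-pointer sweep over the abilities
-- in sorted order and builds the mapping by a running-max filter; return values agree on
-- Pre_ (in Python both A and B also sort `jobs` in place, the same observable mutation).

-- ===== PORT A =====
-- j[0] / j[1] (Python raises on shorter lists; Pre_ excludes those, so the default is never read)
def pvD (e : List Int) : Int := PySem.List.pyGetD e 0 0
def pvW (e : List Int) : Int := PySem.List.pyGetD e 1 0

-- A's inner `while l <= r` binary search; `fuel` only makes the loop total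
-- (every call passes more fuel than the loop can iterate)
def bsearch (m : List (List Int)) (a : Int) : Nat → Int → Int → Int → Int
  | 0, _, _, res => res
  | fuel+1, l, r, res =>
    if l ≤ r then
      let mid := l + PySem.Int.floordiv (r - l) 2
      let e := PySem.List.pyGetD m mid []
      if pvD e = a then pvW e
      else if pvD e < a then bsearch m a fuel (mid+1) r (pvW e)
      else bsearch m a fuel l (mid-1) res
    else res

-- body of A's mapping-building loop (state: mapping so far, pre)
def pvAStep (s : List (List Int) × List Int) (ji : List Int) : List (List Int) × List Int :=
  if pvD ji ≠ pvD s.2 ∧ pvW s.2 < pvW ji then (s.1 ++ [ji], ji) else s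

def choose_work (jobs : List (List Int)) (ability : List Int) : List Int :=
  let sj := PySem.List.sorted2 jobs (fun x => pvD x) (fun x => -(pvW x))
  let j0 := PySem.List.pyGetD sj 0 []
  let st := (PySem.List.pyRange 1 (sj.length : Int)).foldl
      (fun s i => pvAStep s (PySem.List.pyGetD sj i [])) ([j0], j0)
  ability.foldl
    (fun ans v => ans ++ [bsearch st.1 v (st.1.length + 1) 0 ((st.1.length : Int) - 1) (-1)]) []

-- ===== PORT B =====
-- body of B's running-max filter loop (state: mapping so far, best reward or None)
def pvBStep (s : List (Int × Int) × Option Int) (job : List Int) : List (Int × Int) × Option Int :=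
  match s.2 with
  | none => (s.1 ++ [(pvD job, pvW job)], some (pvW job))
  | some b => if b < pvW job then (s.1 ++ [(pvD job, pvW job)], some (pvW job)) else s

-- B's inner `while j < len(mapping) and mapping[j][0] <= a`; fuel only makes it total
def sweepGo (m : List (Int × Int)) (a : Int) : Nat → Int → Int → Int × Int
  | 0, j, res => (j, res)
  | fuel+1, j, res =>
    if j < (m.length : Int) ∧ (PySem.List.pyGetD m j (0, 0)).1 ≤ a then
      sweepGo m a fuel (j+1) (PySem.List.pyGetD m j (0, 0)).2
    else (j, res)

-- ans[i] = v; exact for 0 ≤ i < len(ans), the only indices B uses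
def pvSetIdx (xs : List Int) (i : Int) (v : Int) : List Int := xs.set i.toNat v

-- body of B's outer for-loop over the sorted ability indices (state: ans, j, res)
def pvQStep (ability : List Int) (m : List (Int × Int))
    (s : List Int × Int × Int) (i : Int) : List Int × Int × Int :=
  let a := PySem.List.pyGetD ability i 0
  let jr := sweepGo m a (m.length + 1) s.2.1 s.2.2
  (pvSetIdx s.1 i jr.2, jr.1, jr.2)

def choose_work_alt (jobs : List (List Int)) (ability : List Int) : List Int :=
  let sj := PySem.List.sorted2 jobs (fun x => pvD x) (fun x => -(pvW x))
  let st := sj.foldl pvBStep ([], none)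
  let n := ability.length
  let order := PySem.List.sorted (PySem.List.pyRange 0 (n : Int))
      (fun i => PySem.List.pyGetD ability i 0) false
  (order.foldl (pvQStep ability st.1) (List.replicate n (-1), 0, -1)).1

-- ===== PRECONDITION & SPEC =====
-- Pre_ excludes exactly the inputs where Python A raises: empty `jobs` (IndexError on
-- jobs[0]) and any job with fewer than two entries (IndexError in the sort key).
def Pre_choose_work (jobs : List (List Int)) (ability : List Int) : Prop :=
  jobs ≠ [] ∧ ∀ j ∈ jobs, 2 ≤ j.length
instance (jobs : List (List Int)) (ability : List Int) : Decidable (Pre_choose_work jobs ability) := by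
  unfold Pre_choose_work; infer_instance
def pvWitness_choose_work : List (List Int) × List Int := ([[1, 5], [3, 7]], [0, 2, 3])

def Spec_choose_work (jobs : List (List Int)) (ability : List Int) (out : List Int) : Prop :=
  out = choose_work_alt jobs ability
instance (jobs : List (List Int)) (ability : List Int) (out : List Int) : Decidable (Spec_choose_work jobs ability out) := by
  unfold Spec_choose_work; infer_instance

-- ===== CLAIM (what is proved, stated in full; the proofs are below) =====
def Claim_equal_choose_work : Prop := ∀ (jobs : List (List Int)) (ability : List Int), Dom_choose_work jobs ability → Pre_choose_work jobs ability → Spec_choose_work jobs ability (choose_work jobs ability)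

-- ===== LEMMAS AND PROOFS =====
def pvKey (x : List Int) : Lex (Int × Int) := toLex (pvD x, -(pvW x))
def pvKLe (x y : List Int) : Prop := pvD x < pvD y ∨ (pvD x = pvD y ∧ pvW y ≤ pvW x)

lemma sorted2_as_sorted (xs : List (List Int)) :
    PySem.List.sorted2 xs (fun x => pvD x) (fun x => -(pvW x)) =
      PySem.List.sorted xs pvKey := by
  rw [PySem.List.sorted_eq_foldl_insertBy]
  unfold PySem.List.sorted2
  simp only [if_neg (by decide : ¬ (false = true))]
  congr 1
  funext acc x
  congr 1
  funext a b
  rcases lt_trichotomy (pvD a) (pvD b) with h | h | h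
  · simp [pvKey, Prod.Lex.toLex_lt_toLex, h]
  · have h1 : decide (pvD a < pvD b) = false := by simp [h]
    have h2 : decide (pvD b < pvD a) = false := by simp [h]
    simp only [pvKey, h1, h2, Bool.false_or, Bool.not_false, Bool.true_and]
    rw [decide_eq_decide, Prod.Lex.toLex_lt_toLex]
    omega
  · simp [pvKey, Prod.Lex.toLex_lt_toLex, lt_asymm h, h.ne', h]

lemma sorted_key_pairwise (xs : List (List Int)) :
    (PySem.List.sorted xs pvKey).Pairwise pvKLe := by
  have h := PySem.List.sorted_pairwise xs pvKey
  refine h.imp ?_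
  intro a b hab
  rw [pvKey, pvKey, Prod.Lex.toLex_le_toLex] at hab
  rcases hab with h' | ⟨h1, h2⟩
  · exact Or.inl h'
  · exact Or.inr ⟨h1, by omega⟩

lemma build_agree (rest : List (List Int)) :
    ∀ (pre : List Int) (accA : List (List Int)),
    List.Pairwise pvKLe (pre :: rest) →
    rest.foldl pvBStep (accA.map (fun e => (pvD e, pvW e)), some (pvW pre)) =
      ((rest.foldl pvAStep (accA, pre)).1.map (fun e => (pvD e, pvW e)),
        some (pvW (rest.foldl pvAStep (accA, pre)).2)) := by
  induction rest with
  | nil => intro pre accA _; simp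
  | cons r t ih =>
    intro pre accA hp
    have hkle : pvKLe pre r := (List.pairwise_cons.mp hp).1 r (by simp)
    have htl : List.Pairwise pvKLe (r :: t) := (List.pairwise_cons.mp hp).2
    have hsk : List.Pairwise pvKLe (pre :: t) := by
      have : (pre :: t).Sublist (pre :: r :: t) := by
        refine List.cons_sublist_cons.mpr ?_
        exact List.sublist_cons_self r t
      exact hp.sublist this
    by_cases hc : pvW pre < pvW r
    · have hne : pvD r ≠ pvD pre := by
        rcases hkle with h | ⟨h1, h2⟩ <;> omega
      have hA : pvAStep (accA, pre) r = (accA ++ [r], r) := by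
        simp only [pvAStep]; rw [if_pos ⟨hne, hc⟩]
      have hB : pvBStep (accA.map (fun e => (pvD e, pvW e)), some (pvW pre)) r =
          (accA.map (fun e => (pvD e, pvW e)) ++ [(pvD r, pvW r)], some (pvW r)) := by
        simp only [pvBStep]; rw [if_pos hc]
      simp only [List.foldl_cons, hA, hB]
      have := ih r (accA ++ [r]) htl
      simpa using this
    · have hA : pvAStep (accA, pre) r = (accA, pre) := by
        simp only [pvAStep]
        rw [if_neg]; rintro ⟨-, h⟩; exact hc h
      have hB : pvBStep (accA.map (fun e => (pvD e, pvW e)), some (pvW pre)) r =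
          (accA.map (fun e => (pvD e, pvW e)), some (pvW pre)) := by
        simp only [pvBStep]; rw [if_neg hc]
      simp only [List.foldl_cons, hA, hB]
      exact ih pre accA hsk

lemma build_dlt (rest : List (List Int)) :
    ∀ (pre : List Int) (accA : List (List Int)),
    List.Pairwise pvKLe (pre :: rest) →
    (∀ e ∈ accA, pvD e ≤ pvD pre) →
    accA.Pairwise (fun x y => pvD x < pvD y) →
    (rest.foldl pvAStep (accA, pre)).1.Pairwise (fun x y => pvD x < pvD y) ∧
      (∀ e ∈ (rest.foldl pvAStep (accA, pre)).1, pvD e ≤ pvD (rest.foldl pvAStep (accA, pre)).2) := by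
  induction rest with
  | nil => intro pre accA _ hle hpw; exact ⟨hpw, hle⟩
  | cons r t ih =>
    intro pre accA hp hle hpw
    have hkle : pvKLe pre r := (List.pairwise_cons.mp hp).1 r (by simp)
    have htl : List.Pairwise pvKLe (r :: t) := (List.pairwise_cons.mp hp).2
    have hsk : List.Pairwise pvKLe (pre :: t) := by
      have : (pre :: t).Sublist (pre :: r :: t) := by
        refine List.cons_sublist_cons.mpr ?_
        exact List.sublist_cons_self r t
      exact hp.sublist this
    by_cases hc : pvD r ≠ pvD pre ∧ pvW pre < pvW r
    · have hdlt : pvD pre < pvD r := by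
        rcases hkle with h | ⟨h1, h2⟩ <;> omega
      have hA : pvAStep (accA, pre) r = (accA ++ [r], r) := by
        simp only [pvAStep]; rw [if_pos hc]
      simp only [List.foldl_cons, hA]
      refine ih r (accA ++ [r]) htl ?_ ?_
      · intro e he
        rcases List.mem_append.mp he with h | h
        · exact le_of_lt (lt_of_le_of_lt (hle e h) hdlt)
        · simp at h; subst h; exact le_refl _
      · rw [List.pairwise_append]
        refine ⟨hpw, by simp, ?_⟩
        intro x hx y hy
        simp at hy; subst hy
        exact lt_of_le_of_lt (hle x hx) hdlt
    · have hA : pvAStep (accA, pre) r = (accA, pre) := by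
        simp only [pvAStep]; rw [if_neg hc]
      simp only [List.foldl_cons, hA]
      exact ih pre accA hsk hle hpw

def pvPred (m : List (Int × Int)) (a : Int) : Int :=
  m.foldl (fun res e => if e.1 ≤ a then e.2 else res) (-1)

lemma pv_getD_eq {α : Type} (m : List α) (i : Nat) (d : α) (h : i < m.length) :
    m.getD i d = m[i] := by
  simp [List.getD_eq_getElem?_getD, List.getElem?_eq_getElem h]

lemma last_foldl (ys : List (Int × Int)) (y : Int × Int) (init : Int) :
    (ys ++ [y]).foldl (fun _ e => e.2) init = y.2 := by
  simp [List.foldl_append]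

lemma pred_split (m : List (Int × Int)) (a : Int) (k : Nat) (hk : k ≤ m.length)
    (h1 : ∀ i : Nat, i < k → (m.getD i (0,0)).1 ≤ a)
    (h2 : ∀ i : Nat, k ≤ i → i < m.length → a < (m.getD i (0,0)).1) :
    pvPred m a = if k = 0 then -1 else (m.getD (k-1) (0,0)).2 := by
  have hf : pvPred m a = (m.filter (fun e => decide (e.1 ≤ a))).foldl (fun _ e => e.2) (-1) := by
    rw [pvPred, PySem.List.foldl_ite_eq_foldl_filter]
  have hm : m = m.take k ++ m.drop k := (List.take_append_drop k m).symm
  have hft : (m.take k).filter (fun e => decide (e.1 ≤ a)) = m.take k := by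
    rw [List.filter_eq_self]
    intro e he
    obtain ⟨i, hi, rfl⟩ := List.mem_iff_getElem.mp he
    have hilen : i < m.length := lt_of_lt_of_le (by simp at hi; omega) hk
    have := h1 i (by simp at hi; omega)
    rw [pv_getD_eq m i (0,0) hilen] at this
    simpa [List.getElem_take] using this
  have hfd : (m.drop k).filter (fun e => decide (e.1 ≤ a)) = [] := by
    rw [List.filter_eq_nil_iff]
    intro e he
    obtain ⟨i, hi, rfl⟩ := List.mem_iff_getElem.mp he
    have hilen : k + i < m.length := by simpa [Nat.lt_sub_iff_add_lt'] using hi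
    have := h2 (k+i) (by omega) hilen
    rw [pv_getD_eq m (k+i) (0,0) hilen] at this
    simp [List.getElem_drop]
    omega
  rw [hf]
  conv_lhs => rw [hm]
  rw [List.filter_append, hft, hfd, List.append_nil]
  by_cases hk0 : k = 0
  · simp [hk0]
  · have hk1 : k - 1 < m.length := by omega
    have : m.take k = m.take (k-1) ++ [m[k-1]] := by
      conv_lhs => rw [show k = (k-1) + 1 by omega]
      rw [List.take_add_one, List.getElem?_eq_getElem hk1]
      simp
    rw [this, last_foldl, if_neg hk0, pv_getD_eq m (k-1) (0,0) hk1]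

lemma mapped_getD (m : List (List Int)) (i : Nat) (h : i < m.length) :
    (m.map (fun e => (pvD e, pvW e))).getD i (0,0) = (pvD (m.getD i []), pvW (m.getD i [])) := by
  rw [pv_getD_eq _ i _ (by simpa using h), pv_getD_eq m i [] h, List.getElem_map]

lemma dmono (m : List (List Int)) (hp : m.Pairwise (fun x y => pvD x < pvD y))
    {i j : Nat} (hij : i ≤ j) (hj : j < m.length) :
    pvD (m.getD i []) ≤ pvD (m.getD j []) := by
  rcases Nat.eq_or_lt_of_le hij with h | h
  · subst h; exact le_refl _
  · have := List.pairwise_iff_getElem.mp hp i j (lt_trans h hj) hj h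
    rw [pv_getD_eq m i [] (lt_trans h hj), pv_getD_eq m j [] hj]
    exact le_of_lt this

lemma dstrict (m : List (List Int)) (hp : m.Pairwise (fun x y => pvD x < pvD y))
    {i j : Nat} (hij : i < j) (hj : j < m.length) :
    pvD (m.getD i []) < pvD (m.getD j []) := by
  have h := List.pairwise_iff_getElem.mp hp i j (lt_trans hij hj) hj hij
  rw [pv_getD_eq m i [] (lt_trans hij hj), pv_getD_eq m j [] hj]
  exact h

lemma bsearch_eq (m : List (List Int)) (a : Int)
    (hp : m.Pairwise (fun x y => pvD x < pvD y)) :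
    ∀ (fuel : Nat) (l r res : Int), 0 ≤ l → l ≤ (m.length : Int) → r ≤ (m.length : Int) - 1 →
    (r - l + 1).toNat < fuel →
    (∀ i : Nat, (i : Int) < l → i < m.length → pvD (m.getD i []) < a) →
    (∀ i : Nat, r < (i : Int) → i < m.length → a < pvD (m.getD i [])) →
    res = (if l = 0 then -1 else pvW (m.getD (l - 1).toNat [])) →
    bsearch m a fuel l r res = pvPred (m.map (fun e => (pvD e, pvW e))) a := by
  intro fuel
  induction fuel with
  | zero => intro l r res h0 hl hr hfuel h1 h2 hres; omega
  | succ fuel ih =>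
    intro l r res h0 hl hr hfuel h1 h2 hres
    simp only [bsearch]
    by_cases hlr : l ≤ r
    · rw [if_pos hlr]
      have hdiv : PySem.Int.floordiv (r - l) 2 = (r - l) / 2 :=
        PySem.Int.floordiv_eq_ediv_of_pos (by norm_num)
      set mid := l + PySem.Int.floordiv (r - l) 2 with hmid
      have hmb : l ≤ mid ∧ mid ≤ r := by rw [hmid, hdiv]; omega
      have hmlen : mid.toNat < m.length := by omega
      have hmnn : (mid.toNat : Int) = mid := by omega
      have hget : PySem.List.pyGetD m mid [] = m.getD mid.toNat [] :=
        PySem.List.pyGetD_of_nonneg m [] (by omega)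
      rw [hget]
      by_cases heq : pvD (m.getD mid.toNat []) = a
      · rw [if_pos heq]
        rw [pred_split (m.map (fun e => (pvD e, pvW e))) a (mid.toNat + 1)
          (by simpa using hmlen)
          (by intro i hi
              rw [mapped_getD m i (by omega)]
              calc pvD (m.getD i []) ≤ pvD (m.getD mid.toNat []) := dmono m hp (by omega) hmlen
                _ ≤ a := le_of_eq heq)
          (by intro i hi hilen
              rw [mapped_getD m i (by simpa using hilen)]
              have := dstrict m hp (show mid.toNat < i by omega) (by simpa using hilen)
              omega)]
        rw [if_neg (by omega)]
        rw [mapped_getD m (mid.toNat + 1 - 1) (by omega)]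
        simp
      · rw [if_neg heq]
        by_cases hlt : pvD (m.getD mid.toNat []) < a
        · rw [if_pos hlt]
          refine ih (mid + 1) r (pvW (m.getD mid.toNat [])) (by omega) (by omega) hr (by omega) ?_ h2 ?_
          · intro i hi hilen
            have : pvD (m.getD i []) ≤ pvD (m.getD mid.toNat []) := dmono m hp (by omega) hmlen
            omega
          · rw [if_neg (by omega)]
            congr 2
            omega
        · rw [if_neg hlt]
          refine ih l (mid - 1) res h0 hl (by omega) (by omega) h1 ?_ hres
          intro i hi hilen
          have : pvD (m.getD mid.toNat []) ≤ pvD (m.getD i []) := dmono m hp (by omega) hilen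
          omega
    · rw [if_neg hlr]
      rw [pred_split (m.map (fun e => (pvD e, pvW e))) a l.toNat
        (by simp; omega)
        (by intro i hi
            rw [mapped_getD m i (by omega)]
            have := h1 i (by omega) (by omega)
            omega)
        (by intro i hi hilen
            rw [mapped_getD m i (by simpa using hilen)]
            exact h2 i (by omega) (by simpa using hilen))]
      rw [hres]
      by_cases hl0 : l = 0
      · simp [hl0]
      · rw [if_neg hl0, if_neg (show ¬ l.toNat = 0 by omega)]
        rw [mapped_getD m (l.toNat - 1) (by omega)]
        rw [show (l - 1).toNat = l.toNat - 1 by omega]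

lemma pmono (m : List (Int × Int)) (hd : m.Pairwise (fun x y => x.1 < y.1))
    {i j : Nat} (hij : i ≤ j) (hj : j < m.length) :
    (m.getD i (0,0)).1 ≤ (m.getD j (0,0)).1 := by
  rcases Nat.eq_or_lt_of_le hij with h | h
  · subst h; exact le_refl _
  · have hh := List.pairwise_iff_getElem.mp hd i j (lt_trans h hj) hj h
    rw [pv_getD_eq m i (0,0) (lt_trans h hj), pv_getD_eq m j (0,0) hj]
    exact le_of_lt hh

lemma sweep_props (m : List (Int × Int)) (a : Int) :
    ∀ (fuel : Nat) (j res : Int), 0 ≤ j → j ≤ (m.length : Int) →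
    ((m.length : Int) - j).toNat < fuel →
    (∀ t : Nat, (t : Int) < j → (m.getD t (0,0)).1 ≤ a) →
    res = (if j = 0 then -1 else (m.getD (j - 1).toNat (0,0)).2) →
    0 ≤ (sweepGo m a fuel j res).1 ∧ (sweepGo m a fuel j res).1 ≤ (m.length : Int) ∧
      (∀ t : Nat, (t : Int) < (sweepGo m a fuel j res).1 → (m.getD t (0,0)).1 ≤ a) ∧
      ((sweepGo m a fuel j res).1 = (m.length : Int) ∨
        a < (m.getD (sweepGo m a fuel j res).1.toNat (0,0)).1) ∧
      (sweepGo m a fuel j res).2 =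
        (if (sweepGo m a fuel j res).1 = 0 then -1
          else (m.getD ((sweepGo m a fuel j res).1 - 1).toNat (0,0)).2) := by
  intro fuel
  induction fuel with
  | zero => intro j res h0 hj hfuel hle hres; omega
  | succ fuel ih =>
    intro j res h0 hj hfuel hle hres
    simp only [sweepGo]
    have hget : PySem.List.pyGetD m j (0,0) = m.getD j.toNat (0,0) :=
      PySem.List.pyGetD_of_nonneg m (0,0) h0
    by_cases hc : j < (m.length : Int) ∧ (PySem.List.pyGetD m j (0, 0)).1 ≤ a
    · rw [if_pos hc]
      refine ih (j+1) (PySem.List.pyGetD m j (0,0)).2 (by omega) (by omega) (by omega) ?_ ?_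
      · intro t ht
        rcases Nat.lt_or_ge t j.toNat with h | h
        · exact hle t (by omega)
        · have : t = j.toNat := by omega
          subst this
          rw [← hget]; exact hc.2
      · rw [if_neg (by omega), hget]
        congr 2
        omega
    · rw [if_neg hc]
      refine ⟨h0, hj, hle, ?_, hres⟩
      rcases Decidable.em (j = (m.length : Int)) with h | h
      · exact Or.inl h
      · right
        rw [← hget]
        by_contra hax
        exact hc ⟨by omega, le_of_not_gt hax⟩

lemma sweep_pred (m : List (Int × Int)) (hd : m.Pairwise (fun x y => x.1 < y.1)) (a : Int)
    (j res : Int) (h0 : 0 ≤ j) (hj : j ≤ (m.length : Int))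
    (hle : ∀ t : Nat, (t : Int) < j → (m.getD t (0,0)).1 ≤ a)
    (hres : res = (if j = 0 then -1 else (m.getD (j - 1).toNat (0,0)).2)) :
    (sweepGo m a (m.length + 1) j res).2 = pvPred m a := by
  obtain ⟨q0, qlen, qle, qexit, qres⟩ :=
    sweep_props m a (m.length + 1) j res h0 hj (by omega) hle hres
  set out := sweepGo m a (m.length + 1) j res
  rw [pred_split m a out.1.toNat (by omega)
    (by intro i hi; exact qle i (by omega))
    (by intro i hi hilen
        have hlt : out.1 < (m.length : Int) := by omega
        have ha : a < (m.getD out.1.toNat (0,0)).1 := by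
          rcases qexit with h | h
          · omega
          · exact h
        exact lt_of_lt_of_le ha (pmono m hd hi hilen))]
  rw [qres]
  by_cases h0' : out.1 = 0
  · simp [h0']
  · rw [if_neg h0', if_neg (by omega)]
    congr 2
    omega

lemma outer_eq (ability : List Int) (m : List (Int × Int))
    (hd : m.Pairwise (fun x y => x.1 < y.1)) :
    ∀ (l : List Int) (ans : List Int) (j res : Int),
    l.Pairwise (fun i1 i2 => PySem.List.pyGetD ability i1 0 ≤ PySem.List.pyGetD ability i2 0) →
    0 ≤ j → j ≤ (m.length : Int) →
    (∀ i ∈ l, ∀ t : Nat, (t : Int) < j → (m.getD t (0,0)).1 ≤ PySem.List.pyGetD ability i 0) →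
    res = (if j = 0 then -1 else (m.getD (j - 1).toNat (0,0)).2) →
    (l.foldl (pvQStep ability m) (ans, j, res)).1 =
      l.foldl (fun ans i => pvSetIdx ans i (pvPred m (PySem.List.pyGetD ability i 0))) ans := by
  intro l
  induction l with
  | nil => intro ans j res _ _ _ _ _; rfl
  | cons i t ih =>
    intro ans j res hpw h0 hj hinv hres
    have ha := hinv i (by simp)
    obtain ⟨q0, qlen, qle, qexit, qres⟩ :=
      sweep_props m (PySem.List.pyGetD ability i 0) (m.length + 1) j res h0 hj (by omega) ha hres
    have hpred := sweep_pred m hd (PySem.List.pyGetD ability i 0) j res h0 hj ha hres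
    simp only [List.foldl_cons]
    have hq : pvQStep ability m (ans, j, res) i =
        (pvSetIdx ans i (pvPred m (PySem.List.pyGetD ability i 0)),
          (sweepGo m (PySem.List.pyGetD ability i 0) (m.length + 1) j res).1,
          (sweepGo m (PySem.List.pyGetD ability i 0) (m.length + 1) j res).2) := by
      simp only [pvQStep, hpred]
    rw [hq]
    refine ih _ _ _ (List.pairwise_cons.mp hpw).2 q0 qlen ?_ ?_
    · intro i' hi' t ht
      have hii' : PySem.List.pyGetD ability i 0 ≤ PySem.List.pyGetD ability i' 0 :=
        (List.pairwise_cons.mp hpw).1 i' hi'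
      exact le_trans (qle t ht) hii'
    · exact qres

lemma scatter_length (g : Int → Int) :
    ∀ (l : List Int) (ans : List Int),
    (l.foldl (fun ans i => pvSetIdx ans i (g i)) ans).length = ans.length := by
  intro l
  induction l with
  | nil => intro ans; rfl
  | cons i t ih => intro ans; rw [List.foldl_cons, ih]; simp [pvSetIdx]

lemma scatter_getD (g : Int → Int) :
    ∀ (l : List Int) (ans : List Int) (k : Nat), k < ans.length →
    (∀ i ∈ l, 0 ≤ i ∧ i < (ans.length : Int)) →
    (l.foldl (fun ans i => pvSetIdx ans i (g i)) ans).getD k 0 =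
      if (k : Int) ∈ l then g k else ans.getD k 0 := by
  intro l
  induction l with
  | nil => intro ans k hk _; simp
  | cons i t ih =>
    intro ans k hk hdom
    rw [List.foldl_cons]
    have hi := hdom i (by simp)
    have hlen : (pvSetIdx ans i (g i)).length = ans.length := by simp [pvSetIdx]
    rw [ih (pvSetIdx ans i (g i)) k (by omega)
      (by intro i' hi'; rw [hlen]; exact hdom i' (by simp [hi']))]
    by_cases hmem : (k : Int) ∈ t
    · rw [if_pos hmem, if_pos (by simp [hmem])]
    · rw [if_neg hmem]
      by_cases hki : (k : Int) = i
      · rw [if_pos (by simp [hki])]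
        have : i.toNat = k := by omega
        simp only [pvSetIdx, this]
        rw [pv_getD_eq _ k 0 (by simpa using hk), List.getElem_set_self, hki]
      · rw [if_neg (by simp [hki, hmem])]
        simp only [pvSetIdx]
        rw [pv_getD_eq _ k 0 (by simpa using hk), pv_getD_eq _ k 0 hk]
        rw [List.getElem_set_ne (by omega)]

theorem main_eq (jobs : List (List Int)) (ability : List Int) (hne : jobs ≠ []) :
    choose_work jobs ability = choose_work_alt jobs ability := by
  have hkle : (PySem.List.sorted jobs pvKey).Pairwise pvKLe := sorted_key_pairwise jobs
  have hsjne : PySem.List.sorted jobs pvKey ≠ [] := by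
    intro h
    have hp := PySem.List.sorted_perm jobs pvKey false
    rw [h] at hp
    exact hne hp.nil_eq.symm
  obtain ⟨j0, rest, hcons⟩ := List.exists_cons_of_ne_nil hsjne
  rw [hcons] at hkle
  -- A's mapping
  set mA := (rest.foldl pvAStep ([j0], j0)).1 with hmA
  set preA := (rest.foldl pvAStep ([j0], j0)).2 with hpreA
  have hdltA : mA.Pairwise (fun x y => pvD x < pvD y) := by
    refine (build_dlt rest j0 [j0] hkle ?_ ?_).1
    · intro e he; simp at he; subst he; exact le_refl _
    · simp
  set mB := mA.map (fun e => (pvD e, pvW e)) with hmB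
  have hdB : mB.Pairwise (fun x y => x.1 < y.1) := by
    rw [hmB, List.pairwise_map]; exact hdltA
  -- compute A
  have hA : choose_work jobs ability =
      ability.map (fun v => bsearch mA v (mA.length + 1) 0 ((mA.length : Int) - 1) (-1)) := by
    simp only [choose_work, sorted2_as_sorted, hcons]
    rw [show PySem.List.pyGetD (j0 :: rest) 0 [] = j0 by
      rw [PySem.List.pyGetD_of_nonneg _ _ (le_refl 0)]; rfl]
    rw [PySem.List.foldl_pyRange_pyGetD' (j0 :: rest) [] pvAStep ([j0], j0) (a := 1) (by norm_num)]
    rw [show (List.drop (1:Int).toNat (j0 :: rest)) = rest by simp]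
    rw [PySem.List.foldl_append_singleton_eq_map
      (fun v => bsearch mA v (mA.length + 1) 0 ((mA.length : Int) - 1) (-1)) ability []]
    simp
  -- compute B's mapping
  have hBm : (PySem.List.sorted jobs pvKey).foldl pvBStep ([], none) = (mB, some (pvW preA)) := by
    rw [hcons, List.foldl_cons]
    rw [show pvBStep ([], none) j0 = ([(pvD j0, pvW j0)], some (pvW j0)) from rfl]
    have := build_agree rest j0 [j0] hkle
    simpa using this
  -- compute B
  have hB : choose_work_alt jobs ability =
      ((PySem.List.sorted (PySem.List.pyRange 0 (ability.length : Int))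
          (fun i => PySem.List.pyGetD ability i 0) false).foldl
        (pvQStep ability mB) (List.replicate ability.length (-1), 0, -1)).1 := by
    simp only [choose_work_alt, sorted2_as_sorted, hBm]
  rw [hA, hB]
  set order := PySem.List.sorted (PySem.List.pyRange 0 (ability.length : Int))
      (fun i => PySem.List.pyGetD ability i 0) false with horder
  have hop : order.Pairwise (fun i1 i2 =>
      PySem.List.pyGetD ability i1 0 ≤ PySem.List.pyGetD ability i2 0) :=
    PySem.List.sorted_pairwise _ _
  have hmemo : ∀ i ∈ order, 0 ≤ i ∧ i < (ability.length : Int) := by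
    intro i hi
    have := (PySem.List.sorted_perm (PySem.List.pyRange 0 (ability.length : Int))
      (fun i => PySem.List.pyGetD ability i 0) false).mem_iff.mp hi
    exact PySem.List.mem_pyRange_one.mp this
  rw [outer_eq ability mB hdB order (List.replicate ability.length (-1)) 0 (-1)
    hop (le_refl 0) (by omega) (by intro i _ t ht; omega) (by simp)]
  -- both sides elementwise
  apply List.ext_getElem
  · rw [scatter_length]; simp
  · intro k hk1 hk2
    have hkn : k < ability.length := by simpa using hk1
    have hlenr : (List.replicate ability.length (-1 : Int)).length = ability.length := by simp
    rw [← pv_getD_eq _ k 0 hk2]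
    rw [scatter_getD (fun i => pvPred mB (PySem.List.pyGetD ability i 0)) order
      (List.replicate ability.length (-1)) k (by omega)
      (by intro i hi; rw [hlenr]; exact hmemo i hi)]
    rw [if_pos (by
      refine (PySem.List.sorted_perm _ _ _).mem_iff.mpr ?_
      exact PySem.List.mem_pyRange_one.mpr ⟨by omega, by omega⟩)]
    rw [List.getElem_map]
    rw [PySem.List.pyGetD_of_nonneg ability 0 (by omega), Int.toNat_natCast,
      pv_getD_eq ability k 0 hkn]
    rw [hmB]
    exact bsearch_eq mA ability[k] hdltA (mA.length + 1) 0 ((mA.length : Int) - 1) (-1)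
      (le_refl 0) (by omega) (by omega) (by omega)
      (by intro i hi hilen; omega) (by intro i hi hilen; omega) (by simp)

-- ===== VERDICT (by name: the statement is the Claim_ definition above) =====
theorem choose_work_spec : Claim_equal_choose_work := by
  intro jobs ability _ hpre
  unfold Spec_choose_work
  exact main_eq jobs ability hpre.1
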